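-- pv_equiv track=rewrite | github.com/gooverdian/school-2020-tasks | task_1/solution.py | check_conversion
-- ===== SOURCE A (Python) =====
-- def check_conversion(str_from, str_to):
--     if str_from == str_to:
--         # Если подстроки уже равны
--         return 1
--
--     if len(str_from) != len(str_to) or len(set(str_from)) == len(set(str_to)) == 33:
--         # Если длина подстрок не равна
--         # Или количество уникальных букв в обеих подстроках равно 33
--         return 0
--
--     symbols_map = {}
--     for symbol_from, symbol_to in zip(str_from, str_to):
--         if symbols_map.get(symbol_from, symbol_to) != symbol_to:
--             # Если мы пытаемся заменить одну букву на две разных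
--             return 0
--
--         symbols_map.update({ symbol_from: symbol_to })
--
--     return 1
-- ===== SOURCE B (Python) =====
-- def check_conversion(str_from, str_to):
--     if str_from == str_to:
--         return 1
--     if len(str_from) != len(str_to) or len(set(str_from)) == len(set(str_to)) == 33:
--         return 0
--     # group by source character: for each distinct source char, every occurrence
--     # must be aligned with one and the same target char
--     pairs = list(zip(str_from, str_to))
--     for c in set(str_from):
--         first = None
--         for s, d in pairs:
--             if s == c:
--                 if first is None:
--                     first = d
--                 elif d != first:
--                     return 0
--     return 1
-- ===== Notes on version B (the rewrite author's own statement) =====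
-- stated objective: alternative
-- what changed: A's stateful single pass that grows a dict and aborts on a conflicting replacement is replaced by a stateless grouping scheme: one pass per distinct source character that checks all its occurrences are aligned with one and the same target character; the three leading guards are kept.
import Mathlib
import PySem

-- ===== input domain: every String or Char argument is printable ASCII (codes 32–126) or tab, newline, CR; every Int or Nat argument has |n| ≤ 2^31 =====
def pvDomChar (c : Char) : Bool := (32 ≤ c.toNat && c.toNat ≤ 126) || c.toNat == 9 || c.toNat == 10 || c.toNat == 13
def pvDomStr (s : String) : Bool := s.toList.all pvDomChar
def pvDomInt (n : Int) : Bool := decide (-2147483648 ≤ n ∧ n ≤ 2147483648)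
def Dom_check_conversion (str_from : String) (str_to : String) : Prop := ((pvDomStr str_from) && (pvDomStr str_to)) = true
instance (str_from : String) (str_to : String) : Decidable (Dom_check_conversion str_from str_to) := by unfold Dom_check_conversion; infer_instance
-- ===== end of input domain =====

-- B replaces A's stateful dict-building pass by a stateless grouping scheme: one pass
-- per distinct source character checking all its occurrences share one target. Objective: alternative.

-- ===== PORT A =====
-- the for-loop over zip(str_from, str_to) with the dict `symbols_map`
def pvLoopA (m : PySem.Dict Char Char) : List (Char × Char) → Int
  | [] => 1
  | p :: rest =>
    if m.getD p.1 p.2 ≠ p.2 then 0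
    else pvLoopA (m.insert p.1 p.2) rest

def check_conversion (str_from : String) (str_to : String) : Int :=
  if str_from == str_to then 1
  else if str_from.toList.length ≠ str_to.toList.length ∨
      (PySem.Set.len (PySem.Set.ofList str_from.toList) =
         PySem.Set.len (PySem.Set.ofList str_to.toList) ∧
       PySem.Set.len (PySem.Set.ofList str_to.toList) = 33) then 0
  else pvLoopA PySem.Dict.empty (str_from.toList.zip str_to.toList)

-- ===== PORT B =====
-- inner loop: all occurrences of source char c must align with one and the same target
def pvInnerB (c : Char) (first : Option Char) : List (Char × Char) → Int
  | [] => 1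
  | p :: rest =>
    if p.1 = c then
      match first with
      | none => pvInnerB c (some p.2) rest
      | some a => if p.2 ≠ a then 0 else pvInnerB c (some a) rest
    else pvInnerB c first rest

-- outer loop over the distinct source characters
def pvOuterB (ps : List (Char × Char)) : List Char → Int
  | [] => 1
  | c :: rest =>
    if pvInnerB c none ps = 0 then 0 else pvOuterB ps rest

def check_conversion_alt (str_from : String) (str_to : String) : Int :=
  if str_from == str_to then 1
  else if str_from.toList.length ≠ str_to.toList.length ∨
      (PySem.Set.len (PySem.Set.ofList str_from.toList) =
         PySem.Set.len (PySem.Set.ofList str_to.toList) ∧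
       PySem.Set.len (PySem.Set.ofList str_to.toList) = 33) then 0
  else
    pvOuterB (str_from.toList.zip str_to.toList) (PySem.Set.ofList str_from.toList)

-- ===== PRECONDITION & SPEC =====
def Spec_check_conversion (str_from : String) (str_to : String) (out : Int) : Prop := out = check_conversion_alt str_from str_to
instance (str_from : String) (str_to : String) (out : Int) : Decidable (Spec_check_conversion str_from str_to out) := by unfold Spec_check_conversion; infer_instance

-- ===== CLAIM (what is proved, stated in full; the proofs are below) =====
def Claim_equal_check_conversion : Prop := ∀ (str_from : String) (str_to : String), Dom_check_conversion str_from str_to → Spec_check_conversion str_from str_to (check_conversion str_from str_to)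

-- ===== LEMMAS AND PROOFS =====

-- the mapping defined by a pair list is single-valued
def pvFun (ps : List (Char × Char)) : Prop :=
  ∀ p ∈ ps, ∀ q ∈ ps, p.1 = q.1 → p.2 = q.2

-- every pair already agrees with the dict m
def pvCompat (m : PySem.Dict Char Char) (ps : List (Char × Char)) : Prop :=
  ∀ p ∈ ps, m.getD p.1 p.2 = p.2

theorem pvLoopA_one (ps : List (Char × Char)) : ∀ m : PySem.Dict Char Char,
    (pvLoopA m ps = 1 ↔ pvCompat m ps ∧ pvFun ps) := by
  induction ps with
  | nil =>
    intro m
    simp only [pvLoopA, pvCompat, pvFun]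
    simp
  | cons p rest ih =>
    intro m
    by_cases h : m.getD p.1 p.2 = p.2
    · rw [pvLoopA, if_neg (by simpa using h), ih]
      constructor
      · intro ⟨hc1, hf⟩
        have hfun : pvFun (p :: rest) := by
          have key : ∀ q ∈ rest, q.1 = p.1 → q.2 = p.2 := by
            intro q hq he
            have := hc1 q hq
            rw [he, PySem.Dict.getD_insert, if_pos rfl] at this
            exact this.symm
          intro a ha b hb he
          rcases List.mem_cons.mp ha with ha | ha <;>
            rcases List.mem_cons.mp hb with hb | hb
          · rw [ha, hb]
          · rw [ha]; exact (key b hb (by rw [← he, ha])).symm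
          · rw [hb]; exact key a ha (by rw [he, hb])
          · exact hf a ha b hb he
        refine ⟨?_, hfun⟩
        intro q hq
        rcases List.mem_cons.mp hq with hq | hq
        · rw [hq]; exact h
        · have := hc1 q hq
          rw [PySem.Dict.getD_insert] at this
          by_cases he : q.1 = p.1
          · have h2 : q.2 = p.2 := hfun q (List.mem_cons_of_mem _ hq) p List.mem_cons_self he
            rw [he, h2]; exact h
          · rwa [if_neg he] at this
      · intro ⟨hcm, hfun⟩
        constructor
        · intro q hq
          rw [PySem.Dict.getD_insert]
          by_cases he : q.1 = p.1
          · rw [if_pos he]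
            exact (hfun q (List.mem_cons_of_mem _ hq) p List.mem_cons_self he).symm
          · rw [if_neg he]
            exact hcm q (List.mem_cons_of_mem _ hq)
        · intro a ha b hb
          exact hfun a (List.mem_cons_of_mem _ ha) b (List.mem_cons_of_mem _ hb)
    · rw [pvLoopA, if_pos (by simpa using h)]
      constructor
      · intro h01; exact absurd h01 (by norm_num)
      · intro ⟨hcm, _⟩
        exact absurd (hcm p List.mem_cons_self) h

theorem pvLoopA_cases (ps : List (Char × Char)) : ∀ m : PySem.Dict Char Char,
    pvLoopA m ps = 1 ∨ pvLoopA m ps = 0 := by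
  induction ps with
  | nil => intro m; left; rfl
  | cons p rest ih =>
    intro m
    rw [pvLoopA]
    split
    · right; rfl
    · exact ih _

theorem pvInnerB_some (c a : Char) (l : List (Char × Char)) :
    pvInnerB c (some a) l = 1 ↔ ∀ p ∈ l, p.1 = c → p.2 = a := by
  induction l with
  | nil => simp [pvInnerB]
  | cons p rest ih =>
    rw [pvInnerB]
    by_cases h : p.1 = c
    · rw [if_pos h]
      by_cases h2 : p.2 = a
      · rw [if_neg (by simpa using h2), ih]
        constructor
        · intro hall q hq hc
          rcases List.mem_cons.mp hq with hq | hq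
          · rw [hq]; exact h2
          · exact hall q hq hc
        · intro hall q hq hc; exact hall q (List.mem_cons_of_mem _ hq) hc
      · rw [if_pos (by simpa using h2)]
        constructor
        · intro h01; exact absurd h01 (by norm_num)
        · intro hall; exact absurd (hall p List.mem_cons_self h) h2
    · rw [if_neg h, ih]
      constructor
      · intro hall q hq hc
        rcases List.mem_cons.mp hq with hq | hq
        · exact absurd (hq ▸ hc) h
        · exact hall q hq hc
      · intro hall q hq hc; exact hall q (List.mem_cons_of_mem _ hq) hc

theorem pvInnerB_none (c : Char) (l : List (Char × Char)) :
    pvInnerB c none l = 1 ↔ ∀ p ∈ l, ∀ q ∈ l, p.1 = c → q.1 = c → p.2 = q.2 := by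
  induction l with
  | nil => simp [pvInnerB]
  | cons p rest ih =>
    rw [pvInnerB]
    by_cases h : p.1 = c
    · rw [if_pos h]
      rw [pvInnerB_some]
      constructor
      · intro hall q hq r hr hqc hrc
        have key : ∀ x ∈ (p :: rest), x.1 = c → x.2 = p.2 := by
          intro x hx hxc
          rcases List.mem_cons.mp hx with hx | hx
          · rw [hx]
          · exact hall x hx hxc
        rw [key q hq hqc, key r hr hrc]
      · intro hall q hq hqc
        exact hall q (List.mem_cons_of_mem _ hq) p List.mem_cons_self hqc h
    · rw [if_neg h, ih]
      constructor
      · intro hall q hq r hr hqc hrc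
        rcases List.mem_cons.mp hq with hq | hq
        · exact absurd (hq ▸ hqc) h
        · rcases List.mem_cons.mp hr with hr | hr
          · exact absurd (hr ▸ hrc) h
          · exact hall q hq r hr hqc hrc
      · intro hall q hq r hr hqc hrc
        exact hall q (List.mem_cons_of_mem _ hq) r (List.mem_cons_of_mem _ hr) hqc hrc

theorem pvInnerB_cases (c : Char) (l : List (Char × Char)) :
    ∀ first, pvInnerB c first l = 1 ∨ pvInnerB c first l = 0 := by
  induction l with
  | nil => intro first; left; rfl
  | cons p rest ih =>
    intro first
    by_cases h : p.1 = c
    · cases first with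
      | none =>
        rw [pvInnerB, if_pos h]
        exact ih _
      | some a =>
        rw [pvInnerB, if_pos h]
        by_cases h2 : p.2 = a
        · rw [if_neg (by simpa using h2)]
          exact ih _
        · rw [if_pos (by simpa using h2)]
          right; rfl
    · cases first with
      | none => rw [pvInnerB, if_neg h]; exact ih _
      | some a => rw [pvInnerB, if_neg h]; exact ih _

theorem pvOuterB_one (ps : List (Char × Char)) (cs : List Char) :
    pvOuterB ps cs = 1 ↔ ∀ c ∈ cs, ∀ p ∈ ps, ∀ q ∈ ps, p.1 = c → q.1 = c → p.2 = q.2 := by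
  induction cs with
  | nil => simp [pvOuterB]
  | cons c rest ih =>
    rw [pvOuterB]
    by_cases h : pvInnerB c none ps = 0
    · rw [if_pos h]
      constructor
      · intro h01; exact absurd h01 (by norm_num)
      · intro hall
        have := (pvInnerB_none c ps).mpr (hall c List.mem_cons_self)
        rw [this] at h; exact absurd h (by norm_num)
    · rw [if_neg h, ih]
      have h1 : pvInnerB c none ps = 1 := by
        rcases pvInnerB_cases c ps none with h1 | h0
        · exact h1
        · exact absurd h0 h
      constructor
      · intro hall d hd
        rcases List.mem_cons.mp hd with hd | hd
        · exact hd ▸ (pvInnerB_none c ps).mp h1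
        · exact hall d hd
      · intro hall d hd; exact hall d (List.mem_cons_of_mem _ hd)

theorem pvOuterB_cases (ps : List (Char × Char)) (cs : List Char) :
    pvOuterB ps cs = 1 ∨ pvOuterB ps cs = 0 := by
  induction cs with
  | nil => left; rfl
  | cons c rest ih =>
    rw [pvOuterB]; split
    · right; rfl
    · exact ih

-- over the distinct source chars, the outer loop decides exactly single-valuedness
theorem pvOuterB_fun (a b : List Char) :
    pvOuterB (a.zip b) (PySem.Set.ofList a) = 1 ↔ pvFun (a.zip b) := by
  rw [pvOuterB_one]
  constructor
  · intro h p hp q hq he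
    have hc : p.1 ∈ (PySem.Set.ofList a : List Char) := by
      rw [PySem.Set.mem_ofList]
      exact (List.of_mem_zip hp).1
    exact h p.1 hc p hp q hq rfl he.symm
  · intro h c _ p hp q hq hpc hqc
    exact h p hp q hq (hpc.trans hqc.symm)

theorem pvLoopA_eq_outer (a b : List Char) :
    pvCompat PySem.Dict.empty (a.zip b) →
    pvLoopA PySem.Dict.empty (a.zip b) = pvOuterB (a.zip b) (PySem.Set.ofList a) := by
  intro hc
  by_cases hf : pvFun (a.zip b)
  · rw [(pvLoopA_one _ _).mpr ⟨hc, hf⟩, (pvOuterB_fun a b).mpr hf]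
  · have hA : pvLoopA PySem.Dict.empty (a.zip b) = 0 := by
      rcases pvLoopA_cases (a.zip b) PySem.Dict.empty with h1 | h0
      · exact absurd ((pvLoopA_one _ _).mp h1).2 hf
      · exact h0
    have hB : pvOuterB (a.zip b) (PySem.Set.ofList a) = 0 := by
      rcases pvOuterB_cases (a.zip b) (PySem.Set.ofList a) with h1 | h0
      · exact absurd ((pvOuterB_fun a b).mp h1) hf
      · exact h0
    rw [hA, hB]

-- ===== VERDICT (by name: the statement is the Claim_ definition above) =====
theorem check_conversion_spec : Claim_equal_check_conversion := by
  intro str_from str_to _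
  unfold Spec_check_conversion check_conversion check_conversion_alt
  by_cases h1 : str_from == str_to
  · rw [if_pos h1, if_pos h1]
  · rw [if_neg h1, if_neg h1]
    by_cases h2 : str_from.toList.length ≠ str_to.toList.length ∨
      (PySem.Set.len (PySem.Set.ofList str_from.toList) =
         PySem.Set.len (PySem.Set.ofList str_to.toList) ∧
       PySem.Set.len (PySem.Set.ofList str_to.toList) = 33)
    · rw [if_pos h2, if_pos h2]
    · rw [if_neg h2, if_neg h2]
      exact pvLoopA_eq_outer _ _ (by intro p _; simp [PySem.Dict.getD_empty])
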